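-- pv_equiv track=rewrite | github.com/piyushirish/flight-info-extractor | app/rules.py | extract_cities_with_aliases
-- ===== SOURCE A (Python) =====
-- def extract_cities_with_aliases(text, alias_to_city):
--     text_lower = text.lower()
--     found = []
--
--     for alias, city in alias_to_city.items():
--         index = text_lower.find(alias)
--         if index != -1:
--             found.append((index, city))
--
--     found.sort()
--     seen = set()
--     ordered_unique = []
--     for _, city in found:
--         if city not in seen:
--             seen.add(city)
--             ordered_unique.append(city)
--
--     return ordered_unique
-- ===== SOURCE B (Python) =====
-- def extract_cities_with_aliases(text, alias_to_city):
--     # Single left-to-right scan over text positions: at each position, aliases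
--     # still pending that start there are matched (their first occurrence), their
--     # cities emitted in sorted order, matched aliases dropped from the pending set.
--     tl = text.lower()
--     pending = list(alias_to_city.items())
--     out = []
--     for i in range(len(tl) + 1):
--         if not pending:
--             break
--         hits = []
--         rest = []
--         for alias, city in pending:
--             if tl.startswith(alias, i):
--                 hits.append(city)
--             else:
--                 rest.append((alias, city))
--         pending = rest
--         for city in sorted(hits):
--             if city not in out:
--                 out.append(city)
--     return out
-- ===== Notes on version B (the rewrite author's own statement) =====
-- stated objective: alternative
-- what changed: A runs one substring-find per alias and then sorts the (index, city) pairs; B instead makes a single left-to-right sweep over text positions, matching all still-pending aliases simultaneously at each position and emitting cities in position order (ties sorted per position), so no global sort of pairs is needed.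
import Mathlib
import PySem

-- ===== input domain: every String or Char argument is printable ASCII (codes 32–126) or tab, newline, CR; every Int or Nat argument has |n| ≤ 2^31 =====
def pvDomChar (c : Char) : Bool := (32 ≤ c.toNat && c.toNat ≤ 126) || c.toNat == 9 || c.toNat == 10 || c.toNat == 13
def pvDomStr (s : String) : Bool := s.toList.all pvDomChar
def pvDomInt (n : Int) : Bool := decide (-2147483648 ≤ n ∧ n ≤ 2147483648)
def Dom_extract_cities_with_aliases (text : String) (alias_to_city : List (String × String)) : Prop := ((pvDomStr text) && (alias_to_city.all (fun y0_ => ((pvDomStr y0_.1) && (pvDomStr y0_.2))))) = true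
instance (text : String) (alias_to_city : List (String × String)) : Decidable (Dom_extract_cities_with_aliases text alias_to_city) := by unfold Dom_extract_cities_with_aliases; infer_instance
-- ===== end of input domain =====

-- B replaces A's per-alias `find` scans + global sort of (index, city) pairs by a single
-- left-to-right sweep over text positions that matches all still-pending aliases at once
-- (objective: alternative algorithm, same observable result; not claimed faster).

-- ===== PORT A =====
def extract_cities_with_aliases (text : String) (alias_to_city : List (String × String)) : List String :=
  let text_lower := PySem.Str.lower text
  let found : List (Int × String) :=
    (PySem.Dict.ofList alias_to_city).items.foldl
      (fun acc p =>
        let index := PySem.Str.find text_lower p.1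
        if index ≠ -1 then acc ++ [(index, p.2)] else acc) []
  let found_sorted := PySem.List.sorted2 found (fun p => p.1) (fun p => p.2)
  (found_sorted.foldl
    (fun (st : PySem.Set String × List String) p =>
      if PySem.Set.contains st.1 p.2 then st
      else (PySem.Set.add st.1 p.2, st.2 ++ [p.2]))
    (PySem.Set.empty, [])).2

-- ===== PORT B =====
-- `tl.startswith(alias, i)` with 0 ≤ i ≤ len(tl) is exactly `Chars.startswith (tl.drop i) alias`.
def pvScanB (tl : List Char) (i : Nat) (fuel : Nat)
    (pending : List (String × String)) (out : List String) : List String :=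
  match fuel with
  | 0 => out
  | fuel + 1 =>
    if pending = [] then out
    else
      let hr := pending.foldl
        (fun (s : List String × List (String × String)) p =>
          if PySem.Chars.startswith (tl.drop i) p.1.toList then (s.1 ++ [p.2], s.2)
          else (s.1, s.2 ++ [p]))
        ([], [])
      let out' := (PySem.List.sorted hr.1 (fun c => c)).foldl
        (fun o c => if c ∈ o then o else o ++ [c]) out
      pvScanB tl (i + 1) fuel hr.2 out'

def extract_cities_with_aliases_alt (text : String) (alias_to_city : List (String × String)) : List String :=
  let tl := PySem.Str.lower text
  pvScanB tl.toList 0 (tl.toList.length + 1) (PySem.Dict.ofList alias_to_city).items []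

-- ===== PRECONDITION & SPEC =====
def Spec_extract_cities_with_aliases (text : String) (alias_to_city : List (String × String)) (out : List String) : Prop := out = extract_cities_with_aliases_alt text alias_to_city
instance (text : String) (alias_to_city : List (String × String)) (out : List String) : Decidable (Spec_extract_cities_with_aliases text alias_to_city out) := by unfold Spec_extract_cities_with_aliases; infer_instance

-- ===== CLAIM (what is proved, stated in full; the proofs are below) =====
def Claim_equal_extract_cities_with_aliases : Prop := ∀ (text : String) (alias_to_city : List (String × String)), Dom_extract_cities_with_aliases text alias_to_city → Spec_extract_cities_with_aliases text alias_to_city (extract_cities_with_aliases text alias_to_city)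

-- ===== LEMMAS AND PROOFS =====

-- first index (as Python's find) of an item's alias in the lowered text
def pvF (L : List Char) (q : String × String) : Int := PySem.Chars.find L q.1.toList

-- cities whose alias first occurs at position i, in item order
def pvCities (L : List Char) (items : List (String × String)) (i : Nat) : List String :=
  (items.filter (fun q => decide (pvF L q = (i : Int)))).map (fun q => q.2)

-- append-if-new dedup step
def pvDD (o : List String) (c : String) : List String := if c ∈ o then o else o ++ [c]

def pvGroupFold (L : List Char) (items : List (String × String)) (o : List String) (i : Nat) :
    List String :=
  (PySem.List.sorted (pvCities L items i) (fun c => c)).foldl pvDD o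

-- items whose alias does not occur before position i
def pvPend (L : List Char) (items : List (String × String)) (i : Nat) : List (String × String) :=
  items.filter (fun q => !(decide (pvF L q ≠ -1 ∧ pvF L q < (i : Int))))

-- Python's lexicographic ≤ on (index, city) pairs
def pvLexLe (p q : Int × String) : Prop := p.1 < q.1 ∨ (p.1 = q.1 ∧ p.2 ≤ q.2)

-- the strict comparison sorted2 uses internally
def pvLtB (a b : Int × String) : Bool :=
  decide (a.1 < b.1) || (!decide (b.1 < a.1) && decide (a.2 < b.2))

def pvGrp (L : List Char) (items : List (String × String)) (i : Nat) : List (Int × String) :=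
  (PySem.List.sorted (pvCities L items i) (fun c => c)).map (fun c => ((i : Int), c))

lemma pv_match_iff (L a : List Char) (i : Nat) :
    PySem.Chars.find L a = (i : Int) ↔
      (PySem.Chars.startswith (List.drop i L) a = true ∧
        ¬(PySem.Chars.find L a ≠ -1 ∧ PySem.Chars.find L a < (i : Int))) := by
  constructor
  · intro h
    have h0 : 0 ≤ PySem.Chars.find L a := by omega
    obtain ⟨h1, _⟩ := PySem.Chars.find_spec h0
    have ht : (PySem.Chars.find L a).toNat = i := by omega
    rw [ht] at h1
    exact ⟨(PySem.Chars.startswith_iff _ _).mpr h1, by omega⟩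
  · rintro ⟨hsw, hnot⟩
    have hpre := (PySem.Chars.startswith_iff _ _).mp hsw
    have h0 : 0 ≤ PySem.Chars.find L a := by
      rw [PySem.Chars.find_nonneg_iff, ← PySem.Chars.isIn_iff_infix,
        ← PySem.Chars.exists_prefix_drop_iff_isIn]
      exact ⟨i, hpre⟩
    obtain ⟨_, h2⟩ := PySem.Chars.find_spec h0
    have hle : ¬ (i < (PySem.Chars.find L a).toNat) := fun hlt => h2 i hlt hpre
    omega

lemma pv_pend_zero (L : List Char) (items : List (String × String)) :
    pvPend L items 0 = items := by
  rw [pvPend]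
  apply List.filter_eq_self.mpr
  intro q _
  have := PySem.Chars.neg_one_le_find L q.1.toList
  simp only [pvF, Bool.not_eq_true', decide_eq_false_iff_not, not_and]
  intro _
  push_cast
  omega

lemma pv_hits_eq (L : List Char) (items : List (String × String)) (i : Nat) :
    (pvPend L items i).filter (fun p => PySem.Chars.startswith (L.drop i) p.1.toList) =
      items.filter (fun q => decide (pvF L q = (i : Int))) := by
  rw [pvPend, List.filter_filter]
  apply List.filter_congr
  intro q _
  have hiff := pv_match_iff L q.1.toList i
  simp only [pvF]
  by_cases hF : PySem.Chars.find L q.1.toList = (i : Int)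
  · obtain ⟨hsw, hE⟩ := hiff.mp hF
    simp [hsw, hF]
  · by_cases hsw : PySem.Chars.startswith (List.drop i L) q.1.toList = true
    · by_cases hE : (PySem.Chars.find L q.1.toList ≠ -1 ∧ PySem.Chars.find L q.1.toList < (i : Int))
      · simp [hsw, hF]
        omega
      · exact absurd (hiff.mpr ⟨hsw, hE⟩) hF
    · simp [hsw, hF]

lemma pv_rest_eq (L : List Char) (items : List (String × String)) (i : Nat) :
    (pvPend L items i).filter (fun p => !(PySem.Chars.startswith (L.drop i) p.1.toList)) =
      pvPend L items (i + 1) := by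
  rw [pvPend, pvPend, List.filter_filter]
  apply List.filter_congr
  intro q _
  have hiff := pv_match_iff L q.1.toList i
  have hneg := PySem.Chars.neg_one_le_find L q.1.toList
  simp only [pvF]
  by_cases hF : PySem.Chars.find L q.1.toList = (i : Int)
  · obtain ⟨hsw, _⟩ := hiff.mp hF
    have hE1 : (PySem.Chars.find L q.1.toList ≠ -1 ∧
        PySem.Chars.find L q.1.toList < ((i + 1 : Nat) : Int)) := by push_cast; omega
    simp [hsw, hE1]
    omega
  · by_cases hE : (PySem.Chars.find L q.1.toList ≠ -1 ∧ PySem.Chars.find L q.1.toList < (i : Int))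
    · have hE1 : (PySem.Chars.find L q.1.toList ≠ -1 ∧
          PySem.Chars.find L q.1.toList < ((i + 1 : Nat) : Int)) := by push_cast at *; omega
      simp [hE]
      omega
    · by_cases hsw : PySem.Chars.startswith (List.drop i L) q.1.toList = true
      · exact absurd (hiff.mpr ⟨hsw, hE⟩) hF
      · have hE1 : ¬ (PySem.Chars.find L q.1.toList ≠ -1 ∧
            PySem.Chars.find L q.1.toList < ((i + 1 : Nat) : Int)) := by
          push_cast at *; omega
        simp [hsw, hE]
        omega

lemma pv_cities_empty (L : List Char) (items : List (String × String)) (i j : Nat)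
    (h : pvPend L items i = []) (hij : i ≤ j) : pvCities L items j = [] := by
  rw [pvCities, List.map_eq_nil_iff, List.filter_eq_nil_iff]
  intro q hq
  have hall := List.filter_eq_nil_iff.mp h q hq
  simp only [Bool.not_eq_true', decide_eq_false_iff_not, Decidable.not_not] at hall
  simp only [decide_eq_true_eq]
  intro he
  simp only [pvF] at hall he
  omega

lemma pv_scan_spec (L : List Char) (items : List (String × String)) :
    ∀ (fuel i : Nat) (out : List String),
      pvScanB L i fuel (pvPend L items i) out =
        (List.range' i fuel).foldl (pvGroupFold L items) out := by
  intro fuel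
  induction fuel with
  | zero => intro i out; rfl
  | succ fuel ih =>
    intro i out
    rw [List.range'_succ]
    by_cases hp : pvPend L items i = []
    · rw [pvScanB, if_pos hp]
      have hcong : (i :: List.range' (i + 1) fuel).foldl (pvGroupFold L items) out =
          (i :: List.range' (i + 1) fuel).foldl (fun acc _ => acc) out := by
        apply PySem.List.foldl_congr_mem
        intro acc j hj
        have hij : i ≤ j := by
          rcases List.mem_cons.mp hj with rfl | hj'
          · omega
          · obtain ⟨k, _, hkeq⟩ := List.mem_range'.mp hj'
            omega
        rw [pvGroupFold, pv_cities_empty L items i j hp hij]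
        rfl
      rw [hcong, PySem.List.foldl_ignore]
    · rw [pvScanB, if_neg hp]
      have hsplit : (pvPend L items i).foldl
          (fun (s : List String × List (String × String)) p =>
            if PySem.Chars.startswith (L.drop i) p.1.toList then (s.1 ++ [p.2], s.2)
            else (s.1, s.2 ++ [p])) ([], []) =
          ((pvPend L items i).filter (fun p => PySem.Chars.startswith (L.drop i) p.1.toList)
             |>.map (fun p => p.2),
           (pvPend L items i).filter (fun p => !(PySem.Chars.startswith (L.drop i) p.1.toList))) := by
        have h1 : (pvPend L items i).foldl
            (fun (s : List String × List (String × String)) p =>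
              if PySem.Chars.startswith (L.drop i) p.1.toList then (s.1 ++ [p.2], s.2)
              else (s.1, s.2 ++ [p])) ([], []) =
            (pvPend L items i).foldl
              (fun (s : List String × List (String × String)) p =>
                (if PySem.Chars.startswith (L.drop i) p.1.toList then s.1 ++ [p.2] else s.1,
                 if !(PySem.Chars.startswith (L.drop i) p.1.toList) then s.2 ++ [p] else s.2))
              ([], []) := by
          apply PySem.List.foldl_congr_mem
          intro acc x _
          by_cases h : PySem.Chars.startswith (L.drop i) x.1.toList <;> simp [h]
        have h2 := PySem.List.foldl_prod_mk
          (f := fun (acc1 : List String) (p : String × String) =>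
            if PySem.Chars.startswith (L.drop i) p.1.toList then acc1 ++ [p.2] else acc1)
          (g := fun (acc2 : List (String × String)) (p : String × String) =>
            if !(PySem.Chars.startswith (L.drop i) p.1.toList) then acc2 ++ [p] else acc2)
          (l := pvPend L items i) (a := []) (b := [])
        rw [h1, h2]
        rw [PySem.List.foldl_append_if
            (fun p : String × String => PySem.Chars.startswith (L.drop i) p.1.toList)
            (fun p : String × String => p.2),
          PySem.List.foldl_append_if_eq_filter
            (fun p : String × String => !(PySem.Chars.startswith (L.drop i) p.1.toList))]
        simp
      simp only [hsplit]
      rw [pv_hits_eq, pv_rest_eq]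
      have := ih (i + 1)
        ((PySem.List.sorted (pvCities L items i) (fun c => c)).foldl pvDD out)
      rw [List.foldl_cons]
      have hc : (items.filter (fun q => decide (pvF L q = (i : Int)))).map (fun p => p.2) =
          pvCities L items i := rfl
      rw [hc]
      have hout : ((PySem.List.sorted (pvCities L items i) (fun c => c)).foldl
          (fun o c => if c ∈ o then o else o ++ [c]) out) =
          (PySem.List.sorted (pvCities L items i) (fun c => c)).foldl pvDD out := rfl
      rw [hout, this]
      rfl

-- ===== the A side =====

lemma pv_dedup_pair (l : List (Int × String)) :
    ∀ s : List String,
      (l.foldl (fun (st : PySem.Set String × List String) p =>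
        if PySem.Set.contains st.1 p.2 then st
        else (PySem.Set.add st.1 p.2, st.2 ++ [p.2])) (s, s)).2 =
      l.foldl (fun o p => pvDD o p.2) s := by
  induction l with
  | nil => intro s; rfl
  | cons p t ih =>
    intro s
    simp only [List.foldl_cons]
    by_cases h : p.2 ∈ s
    · have hc : PySem.Set.contains s p.2 = true := by
        simpa [PySem.Set.contains] using h
      rw [if_pos hc, pvDD, if_pos h]
      exact ih s
    · have hnc : ¬ (PySem.Set.contains s p.2 = true) := by
        simpa [PySem.Set.contains] using h
      have ha : PySem.Set.add s p.2 = s ++ [p.2] := by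
        simp [PySem.Set.add, PySem.Set.contains, h]
      rw [if_neg hnc, pvDD, if_neg h, ha]
      exact ih (s ++ [p.2])

lemma pvLtB_le {a b : Int × String} (h : pvLtB a b = true) : pvLexLe a b := by
  simp only [pvLtB, Bool.or_eq_true, Bool.and_eq_true, Bool.not_eq_true',
    decide_eq_true_eq, decide_eq_false_iff_not] at h
  rcases h with h | ⟨h1, h2⟩
  · exact Or.inl h
  · rcases lt_trichotomy a.1 b.1 with h3 | h3 | h3
    · exact Or.inl h3
    · exact Or.inr ⟨h3, le_of_lt h2⟩
    · exact absurd h3 h1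

lemma pvLtB_ge {a b : Int × String} (h : pvLtB a b = false) : pvLexLe b a := by
  simp only [pvLtB, Bool.or_eq_false_iff, Bool.and_eq_false_iff, Bool.not_eq_false',
    decide_eq_true_eq, decide_eq_false_iff_not] at h
  obtain ⟨h1, h2⟩ := h
  rcases h2 with h2 | h2
  · exact Or.inl h2
  · rcases lt_trichotomy a.1 b.1 with h3 | h3 | h3
    · exact absurd h3 h1
    · exact Or.inr ⟨h3.symm, le_of_not_gt h2⟩
    · exact Or.inl h3

lemma pvLexLe_trans {a b c : Int × String} (h1 : pvLexLe a b) (h2 : pvLexLe b c) :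
    pvLexLe a c := by
  rcases h1 with h1 | ⟨h1, h1'⟩ <;> rcases h2 with h2 | ⟨h2, h2'⟩
  · exact Or.inl (lt_trans h1 h2)
  · exact Or.inl (h2 ▸ h1)
  · exact Or.inl (h1 ▸ h2)
  · exact Or.inr ⟨h1.trans h2, le_trans h1' h2'⟩

lemma pv_insert_pairwise (x : Int × String) (ys : List (Int × String))
    (h : ys.Pairwise pvLexLe) : (PySem.List.insertBy pvLtB x ys).Pairwise pvLexLe := by
  induction ys with
  | nil => simp [PySem.List.insertBy]
  | cons y t ih =>
    rw [List.pairwise_cons] at h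
    obtain ⟨hy, ht⟩ := h
    rw [PySem.List.insertBy]
    by_cases hxy : pvLtB x y = true
    · rw [if_pos hxy]
      refine List.Pairwise.cons ?_ (List.Pairwise.cons hy ht)
      intro z hz
      rcases List.mem_cons.mp hz with rfl | hz
      · exact pvLtB_le hxy
      · exact pvLexLe_trans (pvLtB_le hxy) (hy z hz)
    · rw [if_neg hxy]
      refine List.Pairwise.cons ?_ (ih ht)
      intro z hz
      rcases (PySem.List.mem_insertBy _ _ _ _).mp hz with rfl | hz
      · exact pvLtB_ge (Bool.eq_false_iff.mpr hxy)
      · exact hy z hz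

lemma pv_foldl_insert_pairwise (xs : List (Int × String)) :
    ∀ acc : List (Int × String), acc.Pairwise pvLexLe →
      (xs.foldl (fun acc x => PySem.List.insertBy pvLtB x acc) acc).Pairwise pvLexLe := by
  induction xs with
  | nil => intro acc h; exact h
  | cons x t ih =>
    intro acc h
    exact ih _ (pv_insert_pairwise x acc h)

lemma pv_sorted2_eq_foldl (xs : List (Int × String)) :
    PySem.List.sorted2 xs (fun p => p.1) (fun p => p.2) =
      xs.foldl (fun acc x => PySem.List.insertBy pvLtB x acc) [] := rfl

lemma pv_sorted2_pairwise (xs : List (Int × String)) :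
    (PySem.List.sorted2 xs (fun p => p.1) (fun p => p.2)).Pairwise pvLexLe := by
  rw [pv_sorted2_eq_foldl]
  exact pv_foldl_insert_pairwise xs [] (by simp)

lemma pv_filter_or_perm (p q : α → Bool) (l : List α) (hdisj : ∀ a ∈ l, ¬(p a = true ∧ q a = true)) :
    (l.filter (fun a => p a || q a)).Perm (l.filter p ++ l.filter q) := by
  induction l with
  | nil => simp
  | cons x t ih =>
    have hd : ∀ a ∈ t, ¬(p a = true ∧ q a = true) := fun a ha => hdisj a (List.mem_cons_of_mem _ ha)
    by_cases hx : p x = true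
    · have hq : q x = false := by
        rcases Bool.eq_false_or_eq_true (q x) with h | h
        · exact absurd ⟨hx, h⟩ (hdisj x (List.mem_cons_self))
        · exact h
      simp only [List.filter_cons, hx, hq, Bool.true_or]
      simpa using (ih hd).cons x
    · have hx' : p x = false := Bool.eq_false_iff.mpr hx
      by_cases hqx : q x = true
      · simp only [List.filter_cons, hx', hqx, Bool.false_or]
        refine ((ih hd).cons x).trans ?_
        exact (List.perm_middle).symm
      · have hq' : q x = false := Bool.eq_false_iff.mpr hqx
        simp only [List.filter_cons, hx', hq', Bool.false_or]
        exact ih hd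

lemma pv_perm_upto (L : List Char) (items : List (String × String)) :
    ∀ k : Nat,
      ((List.range k).flatMap (pvGrp L items)).Perm
        ((items.filter (fun q => decide (pvF L q ≠ -1 ∧ pvF L q < (k : Int)))).map
          (fun q => (pvF L q, q.2))) := by
  intro k
  induction k with
  | zero =>
    have h0 : items.filter (fun q => decide (pvF L q ≠ -1 ∧ pvF L q < ((0 : Nat) : Int))) = [] := by
      apply List.filter_eq_nil_iff.mpr
      intro q _
      have := PySem.Chars.neg_one_le_find L q.1.toList
      simp only [pvF, decide_eq_true_eq, Nat.cast_zero]
      omega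
    rw [List.range_zero, List.flatMap_nil, h0, List.map_nil]
  | succ k ih =>
    rw [List.range_succ, List.flatMap_append]
    have hsplit : (items.filter (fun q => decide (pvF L q ≠ -1 ∧ pvF L q < ((k + 1 : Nat) : Int)))).Perm
        (items.filter (fun q => decide (pvF L q ≠ -1 ∧ pvF L q < (k : Int))) ++
         items.filter (fun q => decide (pvF L q = (k : Int)))) := by
      have hcong : items.filter (fun q => decide (pvF L q ≠ -1 ∧ pvF L q < ((k + 1 : Nat) : Int))) =
          items.filter (fun q =>
            decide (pvF L q ≠ -1 ∧ pvF L q < (k : Int)) || decide (pvF L q = (k : Int))) := by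
        apply List.filter_congr
        intro q _
        have := PySem.Chars.neg_one_le_find L q.1.toList
        simp only [pvF]
        by_cases h1 : (PySem.Chars.find L q.1.toList ≠ -1 ∧
            PySem.Chars.find L q.1.toList < (k : Int)) <;>
          by_cases h2 : PySem.Chars.find L q.1.toList = (k : Int) <;>
            simp [h1, h2] <;> push_cast at * <;> omega
      rw [hcong]
      apply pv_filter_or_perm
      intro q _
      simp only [decide_eq_true_eq]
      rintro ⟨⟨_, h2⟩, h3⟩
      omega
    refine List.Perm.trans ?_ (hsplit.map (fun q => (pvF L q, q.2))).symm
    rw [List.map_append]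
    refine List.Perm.append ih ?_
    -- the k-th group
    have h1 : (pvGrp L items k).Perm ((pvCities L items k).map (fun c => ((k : Int), c))) := by
      exact (PySem.List.sorted_perm _ _ _).map _
    have h2 : (pvCities L items k).map (fun c => ((k : Int), c)) =
        (items.filter (fun q => decide (pvF L q = (k : Int)))).map (fun q => (pvF L q, q.2)) := by
      rw [pvCities, List.map_map]
      apply List.map_congr_left
      intro q hq
      have := List.of_mem_filter hq
      simp only [decide_eq_true_eq] at this
      simp [Function.comp, this]
    simp only [List.flatMap_cons, List.flatMap_nil, List.append_nil]
    exact h1.trans (h2 ▸ List.Perm.refl _)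

lemma pv_lexle_antisymm (a b : Int × String) (h1 : pvLexLe a b) (h2 : pvLexLe b a) : a = b := by
  rcases h1 with h1 | ⟨h1, h1'⟩ <;> rcases h2 with h2 | ⟨h2, h2'⟩
  · exact absurd h2 (by omega)
  · exact absurd h1 (by omega)
  · exact absurd h2 (by omega)
  · exact Prod.ext h1 (le_antisymm h1' h2')

lemma pv_ys_pairwise (L : List Char) (items : List (String × String)) (n : Nat) :
    ((List.range n).flatMap (pvGrp L items)).Pairwise pvLexLe := by
  rw [List.pairwise_flatMap]
  constructor
  · intro i _
    rw [pvGrp, List.pairwise_map]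
    refine (PySem.List.sorted_pairwise (pvCities L items i) (fun c => c)).imp ?_
    intro a b h
    exact Or.inr ⟨rfl, h⟩
  · refine List.pairwise_lt_range.imp ?_
    intro i j hij x hx y hy
    rw [pvGrp, List.mem_map] at hx hy
    obtain ⟨c, _, rfl⟩ := hx
    obtain ⟨c', _, rfl⟩ := hy
    exact Or.inl (show ((i : Int)) < ((j : Int)) by exact_mod_cast hij)

lemma pv_sorted2_eq_groups (L : List Char) (items : List (String × String)) (n : Nat)
    (hle : ∀ q ∈ items, pvF L q < (n : Int)) :
    PySem.List.sorted2
        ((items.filter (fun q => decide (pvF L q ≠ -1))).map (fun q => (pvF L q, q.2)))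
        (fun p => p.1) (fun p => p.2) =
      (List.range n).flatMap (pvGrp L items) := by
  apply List.Perm.eq_of_pairwise (le := pvLexLe)
  · intro a b _ _ h1 h2
    exact pv_lexle_antisymm a b h1 h2
  · exact pv_sorted2_pairwise _
  · exact pv_ys_pairwise L items n
  · have hfe : items.filter (fun q => decide (pvF L q ≠ -1)) =
        items.filter (fun q => decide (pvF L q ≠ -1 ∧ pvF L q < (n : Int))) := by
      apply List.filter_congr
      intro q hq
      have := hle q hq
      simp only [decide_eq_decide]
      tauto
    refine (PySem.List.sorted2_perm _ _ _ _).trans ?_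
    rw [hfe]
    exact (pv_perm_upto L items n).symm

lemma pv_foldl_flatMap {α β γ : Type} (l : List α) (g : α → List β) (f : γ → β → γ) :
    ∀ init : γ, (l.flatMap g).foldl f init = l.foldl (fun o i => (g i).foldl f o) init := by
  induction l with
  | nil => intro init; rfl
  | cons x t ih =>
    intro init
    rw [List.flatMap_cons, List.foldl_append, List.foldl_cons, ih]

-- ===== VERDICT (by name: the statement is the Claim_ definition above) =====
theorem extract_cities_with_aliases_spec : Claim_equal_extract_cities_with_aliases := by
  intro text alias_to_city _
  unfold Spec_extract_cities_with_aliases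
  set tl := PySem.Str.lower text with htl
  set L : List Char := tl.toList with hL
  set items := (PySem.Dict.ofList alias_to_city).items with hitems
  set n := L.length with hn
  -- B side: the scan is the fold of the per-position group steps
  have hB : extract_cities_with_aliases_alt text alias_to_city =
      (List.range (n + 1)).foldl (pvGroupFold L items) [] := by
    simp only [extract_cities_with_aliases_alt]
    have h0 := pv_scan_spec L items (n + 1) 0 []
    rw [pv_pend_zero] at h0
    rw [List.range_eq_range']
    exact h0
  -- A side
  have hlt : ∀ q ∈ items, pvF L q < ((n + 1 : Nat) : Int) := by
    intro q _
    have := PySem.Chars.find_le_length L q.1.toList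
    simp only [pvF]
    push_cast
    omega
  have hA : extract_cities_with_aliases text alias_to_city =
      ((List.range (n + 1)).flatMap (pvGrp L items)).foldl (fun o p => pvDD o p.2) [] := by
    simp only [extract_cities_with_aliases]
    have hfound : items.foldl
        (fun acc p =>
          if PySem.Str.find tl p.1 ≠ -1 then acc ++ [(PySem.Str.find tl p.1, p.2)] else acc) [] =
        (items.filter (fun q => decide (pvF L q ≠ -1))).map (fun q => (pvF L q, q.2)) := by
      have h1 := PySem.List.foldl_append_ite
        (fun q : String × String => PySem.Str.find tl q.1 ≠ -1)
        (fun q : String × String => (PySem.Str.find tl q.1, q.2)) items []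
      simp only [List.nil_append] at h1
      rw [h1]
      simp [pvF, PySem.Str.find_eq, hL]
    have hd : (PySem.Set.empty : PySem.Set String) = ([] : List String) := rfl
    rw [hfound, hd, pv_dedup_pair, pv_sorted2_eq_groups L items (n + 1) hlt]
  rw [hA, hB, pv_foldl_flatMap]
  apply PySem.List.foldl_congr_mem
  intro acc i _
  rw [pvGrp, List.foldl_map]
  rfl
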